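-- pv_equiv track=rewrite | github.com/afiffadhilah-dev/fabric-debug | tests/integration/test_interview_with_summarization.py | get_answer_for_question
-- ===== SOURCE A (Python) =====
-- PREDEFINED_ANSWERS = {
--     "GENERAL": """I'm a senior software engineer with 6 years of experience building scalable systems.
--     Currently leading a team of 5 engineers at a tech startup. I work primarily with Python, FastAPI,
--     and PostgreSQL for backend, and React for frontend.""",
--
--     "LEADERSHIP": """I've led a team of 5 engineers for 2 years. My responsibilities include architecture
--     decisions, code reviews, mentoring junior developers, and sprint planning. I focus on enabling
--     team performance through clear communication and technical guidance.""",
--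
--     "BACKEND": """I've worked extensively with Python for 6 years, Node.js for 3 years. Built RESTful APIs,
--     GraphQL endpoints, and microservices. Strong experience with FastAPI, Django, and Express.
--     I've handled production systems serving 100K+ daily users.""",
--
--     "DATABASE": """Expert in PostgreSQL with 6 years experience. Also worked with MongoDB, Redis for caching.
--     Designed schemas, optimized queries, implemented replication. Handled databases with millions of records.""",
--
--     "SCALE": """Our main system handles 100K+ daily active users, 10M API requests per day.
--     I've optimized for performance, implemented caching strategies, and designed for horizontal scaling.""",
--
--     "TESTING": """I practice TDD for critical business logic. Use pytest for Python, Jest for JavaScript.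
--     We have comprehensive unit tests, integration tests, and E2E tests with Cypress.""",
--
--     "DEFAULT": """I have solid experience in that area. I've worked on production systems and delivered
--     quality code. I'm comfortable with the technical aspects and collaborate well with teams.""",
-- }
--
-- def get_answer_for_question(question: str) -> str:
--     """Get a predefined answer based on question keywords."""
--     q_lower = question.lower()
--
--     if any(word in q_lower for word in ["lead", "team", "mentor", "manage"]):
--         return PREDEFINED_ANSWERS["LEADERSHIP"]
--     elif any(word in q_lower for word in ["backend", "api", "python", "node", "server"]):
--         return PREDEFINED_ANSWERS["BACKEND"]
--     elif any(word in q_lower for word in ["database", "sql", "postgres", "mongo", "redis"]):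
--         return PREDEFINED_ANSWERS["DATABASE"]
--     elif any(word in q_lower for word in ["scale", "users", "production", "performance"]):
--         return PREDEFINED_ANSWERS["SCALE"]
--     elif any(word in q_lower for word in ["test", "tdd", "quality", "coverage"]):
--         return PREDEFINED_ANSWERS["TESTING"]
--     elif any(word in q_lower for word in ["role", "experience", "background", "tell me"]):
--         return PREDEFINED_ANSWERS["GENERAL"]
--     else:
--         return PREDEFINED_ANSWERS["DEFAULT"]
-- ===== SOURCE B (Python) =====
-- PREDEFINED_ANSWERS = {
--     "GENERAL": """I'm a senior software engineer with 6 years of experience building scalable systems.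
--     Currently leading a team of 5 engineers at a tech startup. I work primarily with Python, FastAPI,
--     and PostgreSQL for backend, and React for frontend.""",
--
--     "LEADERSHIP": """I've led a team of 5 engineers for 2 years. My responsibilities include architecture
--     decisions, code reviews, mentoring junior developers, and sprint planning. I focus on enabling
--     team performance through clear communication and technical guidance.""",
--
--     "BACKEND": """I've worked extensively with Python for 6 years, Node.js for 3 years. Built RESTful APIs,
--     GraphQL endpoints, and microservices. Strong experience with FastAPI, Django, and Express.
--     I've handled production systems serving 100K+ daily users.""",
--
--     "DATABASE": """Expert in PostgreSQL with 6 years experience. Also worked with MongoDB, Redis for caching.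
--     Designed schemas, optimized queries, implemented replication. Handled databases with millions of records.""",
--
--     "SCALE": """Our main system handles 100K+ daily active users, 10M API requests per day.
--     I've optimized for performance, implemented caching strategies, and designed for horizontal scaling.""",
--
--     "TESTING": """I practice TDD for critical business logic. Use pytest for Python, Jest for JavaScript.
--     We have comprehensive unit tests, integration tests, and E2E tests with Cypress.""",
--
--     "DEFAULT": """I have solid experience in that area. I've worked on production systems and delivered
--     quality code. I'm comfortable with the technical aspects and collaborate well with teams.""",
-- }
--
-- # Flat inverted index: each keyword carries the priority of its category
-- # (0 = highest, matching the original elif order).  Correct because each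
-- # category's keywords all carry the same priority, so the minimum matched
-- # priority is exactly the first category of the elif chain that matches.
-- KEYWORD_INDEX = [
--     ("lead", 0), ("team", 0), ("mentor", 0), ("manage", 0),
--     ("backend", 1), ("api", 1), ("python", 1), ("node", 1), ("server", 1),
--     ("database", 2), ("sql", 2), ("postgres", 2), ("mongo", 2), ("redis", 2),
--     ("scale", 3), ("users", 3), ("production", 3), ("performance", 3),
--     ("test", 4), ("tdd", 4), ("quality", 4), ("coverage", 4),
--     ("role", 5), ("experience", 5), ("background", 5), ("tell me", 5),
-- ]
--
-- ANSWER_KEYS = ["LEADERSHIP", "BACKEND", "DATABASE", "SCALE", "TESTING", "GENERAL"]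
--
-- def get_answer_for_question(question: str) -> str:
--     """Get a predefined answer based on question keywords."""
--     q_lower = question.lower()
--     best = None
--     for kw, prio in KEYWORD_INDEX:
--         if kw in q_lower and (best is None or prio < best):
--             best = prio
--     if best is None:
--         return PREDEFINED_ANSWERS["DEFAULT"]
--     return PREDEFINED_ANSWERS[ANSWER_KEYS[best]]
-- ===== Notes on version B (the rewrite author's own statement) =====
-- stated objective: alternative
-- what changed: Replaces the short-circuiting six-branch elif chain over keyword groups by a flat inverted keyword->priority index scanned once with a running-minimum accumulator (argmin of matched priorities); the minimum priority reproduces the elif order.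
import Mathlib
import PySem

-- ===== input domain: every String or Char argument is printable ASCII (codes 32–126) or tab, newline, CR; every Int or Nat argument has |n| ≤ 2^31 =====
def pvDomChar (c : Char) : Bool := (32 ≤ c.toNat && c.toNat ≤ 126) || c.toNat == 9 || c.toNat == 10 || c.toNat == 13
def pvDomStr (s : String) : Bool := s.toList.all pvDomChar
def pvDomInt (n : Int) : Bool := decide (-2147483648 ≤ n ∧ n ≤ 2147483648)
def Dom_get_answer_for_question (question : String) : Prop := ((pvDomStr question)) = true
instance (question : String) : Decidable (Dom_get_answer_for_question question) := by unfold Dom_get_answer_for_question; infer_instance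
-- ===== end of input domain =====

-- B replaces A's short-circuiting elif chain over keyword groups by one scan of a flat
-- inverted keyword->priority index keeping the minimum matched priority ("alternative").

-- The PREDEFINED_ANSWERS dict, as an insertion-ordered association list.
def pvAnswers : PySem.Dict String String := PySem.Dict.mk
  [ ("GENERAL", "I'm a senior software engineer with 6 years of experience building scalable systems.\n    Currently leading a team of 5 engineers at a tech startup. I work primarily with Python, FastAPI,\n    and PostgreSQL for backend, and React for frontend.")
  , ("LEADERSHIP", "I've led a team of 5 engineers for 2 years. My responsibilities include architecture\n    decisions, code reviews, mentoring junior developers, and sprint planning. I focus on enabling\n    team performance through clear communication and technical guidance.")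
  , ("BACKEND", "I've worked extensively with Python for 6 years, Node.js for 3 years. Built RESTful APIs,\n    GraphQL endpoints, and microservices. Strong experience with FastAPI, Django, and Express.\n    I've handled production systems serving 100K+ daily users.")
  , ("DATABASE", "Expert in PostgreSQL with 6 years experience. Also worked with MongoDB, Redis for caching.\n    Designed schemas, optimized queries, implemented replication. Handled databases with millions of records.")
  , ("SCALE", "Our main system handles 100K+ daily active users, 10M API requests per day.\n    I've optimized for performance, implemented caching strategies, and designed for horizontal scaling.")
  , ("TESTING", "I practice TDD for critical business logic. Use pytest for Python, Jest for JavaScript.\n    We have comprehensive unit tests, integration tests, and E2E tests with Cypress.")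
  , ("DEFAULT", "I have solid experience in that area. I've worked on production systems and delivered\n    quality code. I'm comfortable with the technical aspects and collaborate well with teams.")
  ]

-- PREDEFINED_ANSWERS[key]: key lookup (all keys used are present, so the default is unreachable)
def pvAns (key : String) : String := PySem.Dict.getD pvAnswers key ""

-- ===== PORT A =====
-- Literal transliteration: lower once, then the elif chain of any(word in q_lower for …).
def get_answer_for_question (question : String) : String :=
  let q_lower := PySem.Str.lower question
  if ["lead", "team", "mentor", "manage"].any (fun word => PySem.Str.isIn word q_lower) then
    pvAns "LEADERSHIP"
  else if ["backend", "api", "python", "node", "server"].any (fun word => PySem.Str.isIn word q_lower) then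
    pvAns "BACKEND"
  else if ["database", "sql", "postgres", "mongo", "redis"].any (fun word => PySem.Str.isIn word q_lower) then
    pvAns "DATABASE"
  else if ["scale", "users", "production", "performance"].any (fun word => PySem.Str.isIn word q_lower) then
    pvAns "SCALE"
  else if ["test", "tdd", "quality", "coverage"].any (fun word => PySem.Str.isIn word q_lower) then
    pvAns "TESTING"
  else if ["role", "experience", "background", "tell me"].any (fun word => PySem.Str.isIn word q_lower) then
    pvAns "GENERAL"
  else
    pvAns "DEFAULT"

-- ===== PORT B =====
-- The flat inverted keyword->priority index of Source B (KEYWORD_INDEX).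
def pvKeywordIndex : List (String × Nat) :=
  [ ("lead", 0), ("team", 0), ("mentor", 0), ("manage", 0)
  , ("backend", 1), ("api", 1), ("python", 1), ("node", 1), ("server", 1)
  , ("database", 2), ("sql", 2), ("postgres", 2), ("mongo", 2), ("redis", 2)
  , ("scale", 3), ("users", 3), ("production", 3), ("performance", 3)
  , ("test", 4), ("tdd", 4), ("quality", 4), ("coverage", 4)
  , ("role", 5), ("experience", 5), ("background", 5), ("tell me", 5) ]

-- ANSWER_KEYS
def pvAnswerKeys : List String :=
  ["LEADERSHIP", "BACKEND", "DATABASE", "SCALE", "TESTING", "GENERAL"]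

-- loop body: if kw in q_lower and (best is None or prio < best): best = prio
def pvStep (q_lower : String) (best : Option Nat) (p : String × Nat) : Option Nat :=
  if PySem.Str.isIn p.1 q_lower &&
      (match best with | none => true | some b => decide (p.2 < b)) then
    some p.2
  else best

def get_answer_for_question_alt (question : String) : String :=
  let q_lower := PySem.Str.lower question
  match pvKeywordIndex.foldl (pvStep q_lower) none with
  | none => pvAns "DEFAULT"
  | some i => pvAns ((PySem.List.pyGet? pvAnswerKeys (i : Int)).getD "")

-- ===== PRECONDITION & SPEC =====
def Spec_get_answer_for_question (question : String) (out : String) : Prop := out = get_answer_for_question_alt question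
instance (question : String) (out : String) : Decidable (Spec_get_answer_for_question question out) := by unfold Spec_get_answer_for_question; infer_instance

-- ===== CLAIM (what is proved, stated in full; the proofs are below) =====
def Claim_equal_get_answer_for_question : Prop := ∀ (question : String), Dom_get_answer_for_question question → Spec_get_answer_for_question question (get_answer_for_question question)

-- ===== LEMMAS AND PROOFS =====

-- min on Option Nat (none = no match yet)
def pvMergeMin : Option Nat → Option Nat → Option Nat
  | none, b => b
  | some x, none => some x
  | some x, some y => some (min x y)

-- minimum priority among matching entries of the index
def pvMinMatch (q : String) : List (String × Nat) → Option Nat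
  | [] => none
  | (w, i) :: rest =>
      if PySem.Str.isIn w q then pvMergeMin (some i) (pvMinMatch q rest)
      else pvMinMatch q rest

theorem pvMergeMin_none_right (a : Option Nat) : pvMergeMin a none = a := by
  cases a <;> rfl

theorem pvMergeMin_assoc (a b c : Option Nat) :
    pvMergeMin (pvMergeMin a b) c = pvMergeMin a (pvMergeMin b c) := by
  cases a <;> cases b <;> cases c <;> simp [pvMergeMin, Nat.min_assoc]

-- one loop step keeps the minimum of the accumulator and a matching priority
theorem pvStep_eq (q w : String) (i : Nat) (acc : Option Nat) :
    pvStep q acc (w, i) = if PySem.Str.isIn w q then pvMergeMin acc (some i) else acc := by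
  cases hIn : PySem.Str.isIn w q with
  | false => simp only [pvStep, hIn, Bool.false_and]; rfl
  | true =>
    cases acc with
    | none => simp only [pvStep, hIn, pvMergeMin, Bool.true_and]
    | some b =>
      by_cases h2 : i < b
      · simp only [pvStep, hIn, pvMergeMin, Bool.true_and, decide_eq_true h2]
        simp [Nat.min_eq_right (Nat.le_of_lt h2)]
      · simp only [pvStep, hIn, pvMergeMin, Bool.true_and, decide_eq_false h2]
        simp [Nat.min_eq_left (Nat.le_of_not_lt h2)]

-- loop invariant: the fold computes the min of the accumulator and the matched priorities
theorem pv_fold_eq_minMatch (q : String) (l : List (String × Nat)) :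
    ∀ acc : Option Nat, l.foldl (pvStep q) acc = pvMergeMin acc (pvMinMatch q l) := by
  induction l with
  | nil => intro acc; simp [pvMinMatch, pvMergeMin_none_right]
  | cons p rest ih =>
    intro acc
    obtain ⟨w, i⟩ := p
    rw [List.foldl_cons, ih, pvStep_eq]
    show _ = pvMergeMin acc (pvMinMatch q ((w, i) :: rest))
    rw [pvMinMatch]
    cases hIn : PySem.Str.isIn w q
    · rfl
    · rw [if_pos rfl, if_pos rfl, ← pvMergeMin_assoc]

-- over a constant-priority group the minimum is "some i iff any keyword matches"
theorem pv_minMatch_group (q : String) (i : Nat) (ws : List String) :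
    pvMinMatch q (ws.map (fun w => (w, i))) =
      if ws.any (fun word => PySem.Str.isIn word q) then some i else none := by
  induction ws with
  | nil => rfl
  | cons w ws ih =>
    rw [List.map_cons, pvMinMatch, ih, List.any_cons]
    cases hIn : PySem.Str.isIn w q
    · simp only [Bool.false_or]; rfl
    · rw [if_pos rfl, Bool.true_or, if_pos rfl]
      cases hR : ws.any (fun word => PySem.Str.isIn word q) <;> simp [pvMergeMin]

theorem pv_minMatch_append (q : String) (l1 l2 : List (String × Nat)) :
    pvMinMatch q (l1 ++ l2) = pvMergeMin (pvMinMatch q l1) (pvMinMatch q l2) := by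
  induction l1 with
  | nil => rfl
  | cons p rest ih =>
    obtain ⟨w, i⟩ := p
    rw [List.cons_append, pvMinMatch, pvMinMatch, ih]
    cases hIn : PySem.Str.isIn w q
    · rfl
    · rw [if_pos rfl, if_pos rfl, pvMergeMin_assoc]

-- the flat index is the concatenation of the six constant-priority groups
theorem pvKeywordIndex_eq :
    pvKeywordIndex =
      (["lead", "team", "mentor", "manage"].map (fun w => (w, 0))) ++
      ((["backend", "api", "python", "node", "server"].map (fun w => (w, 1))) ++
      ((["database", "sql", "postgres", "mongo", "redis"].map (fun w => (w, 2))) ++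
      ((["scale", "users", "production", "performance"].map (fun w => (w, 3))) ++
      ((["test", "tdd", "quality", "coverage"].map (fun w => (w, 4))) ++
      (["role", "experience", "background", "tell me"].map (fun w => (w, 5))))))) := rfl

-- the two bodies agree for every lowered question string q
theorem pv_core (q : String) :
    (if ["lead", "team", "mentor", "manage"].any (fun word => PySem.Str.isIn word q) then
      pvAns "LEADERSHIP"
    else if ["backend", "api", "python", "node", "server"].any (fun word => PySem.Str.isIn word q) then
      pvAns "BACKEND"
    else if ["database", "sql", "postgres", "mongo", "redis"].any (fun word => PySem.Str.isIn word q) then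
      pvAns "DATABASE"
    else if ["scale", "users", "production", "performance"].any (fun word => PySem.Str.isIn word q) then
      pvAns "SCALE"
    else if ["test", "tdd", "quality", "coverage"].any (fun word => PySem.Str.isIn word q) then
      pvAns "TESTING"
    else if ["role", "experience", "background", "tell me"].any (fun word => PySem.Str.isIn word q) then
      pvAns "GENERAL"
    else
      pvAns "DEFAULT") =
    (match pvKeywordIndex.foldl (pvStep q) none with
     | none => pvAns "DEFAULT"
     | some i => pvAns ((PySem.List.pyGet? pvAnswerKeys (i : Int)).getD "")) := by
  rw [pv_fold_eq_minMatch, pvKeywordIndex_eq]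
  simp only [pv_minMatch_append, pv_minMatch_group]
  by_cases h0 : ["lead", "team", "mentor", "manage"].any (fun word => PySem.Str.isIn word q) <;>
  by_cases h1 : ["backend", "api", "python", "node", "server"].any (fun word => PySem.Str.isIn word q) <;>
  by_cases h2 : ["database", "sql", "postgres", "mongo", "redis"].any (fun word => PySem.Str.isIn word q) <;>
  by_cases h3 : ["scale", "users", "production", "performance"].any (fun word => PySem.Str.isIn word q) <;>
  by_cases h4 : ["test", "tdd", "quality", "coverage"].any (fun word => PySem.Str.isIn word q) <;>
  by_cases h5 : ["role", "experience", "background", "tell me"].any (fun word => PySem.Str.isIn word q) <;>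
    simp only [h0, h1, h2, h3, h4, h5, Bool.not_eq_true] at * <;> rfl

theorem pv_eq (question : String) :
    get_answer_for_question question = get_answer_for_question_alt question :=
  pv_core (PySem.Str.lower question)

-- ===== VERDICT (by name: the statement is the Claim_ definition above) =====
theorem get_answer_for_question_spec : Claim_equal_get_answer_for_question := by
  intro question _
  unfold Spec_get_answer_for_question
  exact pv_eq question
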